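-- pv_equiv track=rewrite | github.com/jino1023/Algorithm-Test | programmers/숫자게임.py | solution
-- ===== SOURCE A (Python) =====
-- def solution(A, B):
--     answer = 0
--     #내림차순으로 정렬
--     A.sort(reverse=True)
--     B.sort(reverse=True)
--     for i in A:
--         if i < B[0]:
--             answer+=1
--             del B[0]
--         else:
--             continue
--     return answer
-- ===== SOURCE B (Python) =====
-- def solution(A, B):
--     # Sort both descending; advance an index pointer into B instead of deleting B[0].
--     # Return-value equivalent to A; A additionally empties matched prefix of B in place.
--     A.sort(reverse=True)
--     B.sort(reverse=True)
--     j = 0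
--     for a in A:
--         if j < len(B) and a < B[j]:
--             j += 1
--     return j
-- ===== Notes on version B (the rewrite author's own statement) =====
-- stated objective: faster
-- what changed: Replaces the repeated del B[0] (an O(n) list shift per match) by an index pointer into the sorted B, turning the loop body into O(1); the pointer guard also makes B total where A raises.
import Mathlib
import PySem

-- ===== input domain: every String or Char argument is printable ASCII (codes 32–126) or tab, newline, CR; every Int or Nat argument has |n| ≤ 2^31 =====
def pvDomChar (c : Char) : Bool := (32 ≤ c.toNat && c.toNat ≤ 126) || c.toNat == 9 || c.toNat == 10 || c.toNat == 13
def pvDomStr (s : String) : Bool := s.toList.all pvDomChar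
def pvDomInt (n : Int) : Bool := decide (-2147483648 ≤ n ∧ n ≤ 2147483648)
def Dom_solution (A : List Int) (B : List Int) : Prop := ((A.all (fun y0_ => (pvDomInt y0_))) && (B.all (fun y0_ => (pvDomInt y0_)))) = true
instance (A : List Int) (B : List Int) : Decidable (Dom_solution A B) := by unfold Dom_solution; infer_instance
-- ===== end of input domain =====

-- B changes A's algorithm: an index pointer into sorted B replaces the O(n) 'del B[0]' per match.
-- Equivalence is about the RETURN value only: Python A sorts A and B in place and deletes matched
-- elements from B; Python B sorts both in place but does not delete from B.

-- ===== PORT A =====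
-- one loop step of A: state none = IndexError already raised (B exhausted); B[0] on empty raises
def stepA (st : Option (Int × List Int)) (i : Int) : Option (Int × List Int) :=
  match st with
  | none => none
  | some (ans, bs) =>
    match bs with
    | [] => none                                   -- i < B[0] raises IndexError
    | b :: rest => if i < b then some (ans + 1, rest) else some (ans, bs)

def solution (A : List Int) (B : List Int) : Int :=
  let sa := PySem.List.sorted A (fun x => x) true
  let sb := PySem.List.sorted B (fun x => x) true
  match sa.foldl stepA (some ((0 : Int), sb)) with
  | some (ans, _) => ans
  | none => 0      -- unreachable under Pre_solution (Python A raises IndexError there)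

-- ===== PORT B =====
-- one loop step of B: 'if j < len(B) and a < B[j]: j += 1'
def stepB (sb : List Int) (j : Nat) (a : Int) : Nat :=
  if j < sb.length then (if a < sb.getD j 0 then j + 1 else j) else j

def solution_alt (A : List Int) (B : List Int) : Int :=
  let sa := PySem.List.sorted A (fun x => x) true
  let sb := PySem.List.sorted B (fun x => x) true
  ((sa.foldl (stepB sb) 0 : Nat) : Int)

-- ===== PRECONDITION & SPEC =====
-- Pre_ excludes exactly the inputs on which A raises IndexError (B exhausted by matches while
-- elements of A remain, evaluating B[0] on an empty list); A returns normally everywhere else.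
def Pre_solution (A : List Int) (B : List Int) : Prop :=
  ¬ (1 ≤ A.length ∧ B.length + 1 ≤ A.length ∧
     ∀ j < B.length,
       (PySem.List.sorted A (fun x => x) true).getD (A.length - 1 - B.length + j) 0 <
       (PySem.List.sorted B (fun x => x) true).getD j 0)
instance (A : List Int) (B : List Int) : Decidable (Pre_solution A B) := by
  unfold Pre_solution; infer_instance

def pvWitness_solution : List Int × List Int := ([1, 2], [0])

def Spec_solution (A : List Int) (B : List Int) (out : Int) : Prop := out = solution_alt A B
instance (A : List Int) (B : List Int) (out : Int) : Decidable (Spec_solution A B out) := by unfold Spec_solution; infer_instance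

-- ===== CLAIM (what is proved, stated in full; the proofs are below) =====
def Claim_equal_solution : Prop := ∀ (A : List Int) (B : List Int), Dom_solution A B → Pre_solution A B → Spec_solution A B (solution A B)

-- ===== LEMMAS AND PROOFS =====

-- a 'none' state is absorbing in A's loop
theorem foldl_stepA_none (xs : List Int) : xs.foldl stepA none = none := by
  induction xs with
  | nil => rfl
  | cons a xs ih => simpa [stepA] using ih

-- the pointer never exceeds len(sb) and moves by at most one per element
theorem stepB_bounds (sb : List Int) (xs : List Int) (j : Nat) :
    j ≤ xs.foldl (stepB sb) j ∧ xs.foldl (stepB sb) j ≤ j + xs.length ∧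
    (j ≤ sb.length → xs.foldl (stepB sb) j ≤ sb.length) := by
  induction xs generalizing j with
  | nil => simp
  | cons a xs ih =>
    simp only [List.foldl_cons, List.length_cons]
    rcases ih (stepB sb j a) with ⟨h1, h2, h3⟩
    have hs : j ≤ stepB sb j a ∧ stepB sb j a ≤ j + 1 ∧ (j ≤ sb.length → stepB sb j a ≤ sb.length) := by
      unfold stepB; split_ifs <;> omega
    exact ⟨le_trans hs.1 h1, by omega, fun h => h3 (hs.2.2 h)⟩

-- bridge: A's (answer, remaining-B) state is (j, sb.drop j) for B's pointer j, unless A raised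
theorem bridge (sb : List Int) (xs : List Int) (j : Nat) (hj : j ≤ sb.length) :
    xs.foldl stepA (some ((j : Int), sb.drop j)) = none ∨
    xs.foldl stepA (some ((j : Int), sb.drop j)) =
      some (((xs.foldl (stepB sb) j : Nat) : Int), sb.drop (xs.foldl (stepB sb) j)) := by
  induction xs generalizing j with
  | nil => right; rfl
  | cons a xs ih =>
    simp only [List.foldl_cons]
    rcases Nat.lt_or_ge j sb.length with hlt | hge
    · have hdrop : sb.drop j = sb[j] :: sb.drop (j + 1) := (List.getElem_cons_drop hlt).symm
      have hget : sb.getD j 0 = sb[j] := List.getD_eq_getElem sb 0 hlt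
      by_cases hab : a < sb[j]
      · have hstA : stepA (some ((j : Int), sb.drop j)) a = some ((j : Int) + 1, sb.drop (j + 1)) := by
          rw [hdrop]; simp [stepA, hab]
        have hstB : stepB sb j a = j + 1 := by unfold stepB; rw [hget]; simp [hlt, hab]
        rw [hstA, hstB]
        have : ((j : Int) + 1) = (((j + 1 : Nat) : Nat) : Int) := by push_cast; ring
        rw [this]
        exact ih (j + 1) hlt
      · have hstA : stepA (some ((j : Int), sb.drop j)) a = some ((j : Int), sb.drop j) := by
          rw [hdrop]; simp [stepA, hab]
        have hstB : stepB sb j a = j := by unfold stepB; rw [hget]; simp [hlt, hab]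
        rw [hstA, hstB]
        exact ih j hj
    · have hj' : j = sb.length := le_antisymm hj hge
      have hdrop : sb.drop j = [] := by simp [hj']
      have : stepA (some ((j : Int), sb.drop j)) a = none := by rw [hdrop]; rfl
      rw [this, foldl_stepA_none]; left; rfl

-- if A raises, B's pointer reaches len(sb) on a strict prefix of the loop
theorem raise_prefix (sb : List Int) (xs : List Int) (j : Nat) (hj : j ≤ sb.length)
    (h : xs.foldl stepA (some ((j : Int), sb.drop j)) = none) :
    ∃ k < xs.length, (xs.take k).foldl (stepB sb) j = sb.length := by
  induction xs generalizing j with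
  | nil => simp at h
  | cons a xs ih =>
    rcases Nat.lt_or_ge j sb.length with hlt | hge
    · have hdrop : sb.drop j = sb[j] :: sb.drop (j + 1) := (List.getElem_cons_drop hlt).symm
      have hget : sb.getD j 0 = sb[j] := List.getD_eq_getElem sb 0 hlt
      by_cases hab : a < sb[j]
      · have hstA : stepA (some ((j : Int), sb.drop j)) a = some ((j : Int) + 1, sb.drop (j + 1)) := by
          rw [hdrop]; simp [stepA, hab]
        rw [List.foldl_cons, hstA] at h
        have : ((j : Int) + 1) = (((j + 1 : Nat) : Nat) : Int) := by push_cast; ring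
        rw [this] at h
        rcases ih (j + 1) hlt h with ⟨k, hk, hfold⟩
        refine ⟨k + 1, by simpa using Nat.succ_lt_succ hk, ?_⟩
        have hstB : stepB sb j a = j + 1 := by unfold stepB; rw [hget]; simp [hlt, hab]
        simp [List.take_succ_cons, List.foldl_cons, hstB, hfold]
      · have hstA : stepA (some ((j : Int), sb.drop j)) a = some ((j : Int), sb.drop j) := by
          rw [hdrop]; simp [stepA, hab]
        rw [List.foldl_cons, hstA] at h
        rcases ih j hj h with ⟨k, hk, hfold⟩
        refine ⟨k + 1, by simpa using Nat.succ_lt_succ hk, ?_⟩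
        have hstB : stepB sb j a = j := by unfold stepB; rw [hget]; simp [hlt, hab]
        simp [List.take_succ_cons, List.foldl_cons, hstB, hfold]
    · exact ⟨0, by simp, by simpa using le_antisymm hj hge⟩

-- descending list: values do not increase with the index
theorem desc_getD (xs : List Int) (hp : xs.Pairwise (fun a b => b ≤ a)) (p q : Nat)
    (hpq : p ≤ q) (hq : q < xs.length) : xs.getD q 0 ≤ xs.getD p 0 := by
  have hp' : p < xs.length := lt_of_le_of_lt hpq hq
  rw [List.getD_eq_getElem xs 0 hq, List.getD_eq_getElem xs 0 hp']
  rcases Nat.eq_or_lt_of_le hpq with rfl | hlt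
  · exact le_refl _
  · exact (List.pairwise_iff_getElem.mp hp) p q hp' hq hlt

-- key matching lemma: if the pointer goes from j to J over a descending xs, then each matched
-- sb[m] beats the element of xs that is (J-m) positions from the end
theorem matched_tail (sb : List Int) (xs : List Int) (hdesc : xs.Pairwise (fun a b => b ≤ a))
    (j : Nat) : ∀ m, j ≤ m → m < xs.foldl (stepB sb) j →
      xs.getD (xs.length - (xs.foldl (stepB sb) j - m)) 0 < sb.getD m 0 := by
  induction xs generalizing j with
  | nil => intro m h1 h2; simp at h2; omega
  | cons a xs ih =>
    intro m hjm hm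
    have hdesc' : xs.Pairwise (fun a b => b ≤ a) := hdesc.tail
    simp only [List.foldl_cons] at hm ⊢
    by_cases hja : j < sb.length ∧ a < sb.getD j 0
    · have hstep : stepB sb j a = j + 1 := by unfold stepB; rw [if_pos hja.1, if_pos hja.2]
      rw [hstep] at hm ⊢
      have hJle : xs.foldl (stepB sb) (j + 1) ≤ (j + 1) + xs.length := (stepB_bounds sb xs (j + 1)).2.1
      rcases Nat.lt_or_ge j m with hlt | hge
      · have H := ih hdesc' (j + 1) m (by omega) hm
        have hshift : (a :: xs).length - (xs.foldl (stepB sb) (j + 1) - m) =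
            (xs.length - (xs.foldl (stepB sb) (j + 1) - m)) + 1 := by
          simp only [List.length_cons]; omega
        rw [hshift, List.getD_cons_succ]; exact H
      · have hmj : m = j := by omega
        subst hmj
        have hidx : (a :: xs).length - (xs.foldl (stepB sb) (m + 1) - m) < (a :: xs).length := by
          simp only [List.length_cons]; omega
        have hle : (a :: xs).getD ((a :: xs).length - (xs.foldl (stepB sb) (m + 1) - m)) 0 ≤ (a :: xs).getD 0 0 :=
          desc_getD (a :: xs) hdesc 0 _ (Nat.zero_le _) hidx
        simp only [List.getD_cons_zero] at hle
        exact lt_of_le_of_lt hle hja.2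
    · have hstep : stepB sb j a = j := by
        unfold stepB; split_ifs with h1 h2
        · exact absurd ⟨h1, h2⟩ hja
        · rfl
        · rfl
      rw [hstep] at hm ⊢
      have H := ih hdesc' j m hjm hm
      have hJle : xs.foldl (stepB sb) j ≤ j + xs.length := (stepB_bounds sb xs j).2.1
      have hshift : (a :: xs).length - (xs.foldl (stepB sb) j - m) =
          (xs.length - (xs.foldl (stepB sb) j - m)) + 1 := by
        simp only [List.length_cons]; omega
      rw [hshift, List.getD_cons_succ]; exact H

-- prefixes of descending lists, and getD on take
theorem getD_take (xs : List Int) (k t : Nat) (ht : t < k) : (xs.take k).getD t 0 = xs.getD t 0 := by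
  unfold List.getD
  rw [List.getElem?_take_of_lt ht]

-- under Pre_, A's loop does not raise
theorem no_raise (A B : List Int) (hpre : Pre_solution A B) :
    (PySem.List.sorted A (fun x => x) true).foldl stepA
      (some ((0 : Int), PySem.List.sorted B (fun x => x) true)) ≠ none := by
  intro hnone
  set sa := PySem.List.sorted A (fun x => x) true with hsa
  set sb := PySem.List.sorted B (fun x => x) true with hsb
  have hlenA : sa.length = A.length := PySem.List.length_sorted A (fun x => x) true
  have hlenB : sb.length = B.length := PySem.List.length_sorted B (fun x => x) true
  have h0 : sb.drop 0 = sb := rfl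
  have hnone' : sa.foldl stepA (some (((0 : Nat) : Int), sb.drop 0)) = none := by
    rw [h0]; exact_mod_cast hnone
  rcases raise_prefix sb sa 0 (Nat.zero_le _) hnone' with ⟨k, hk, hfold⟩
  have hdesc : sa.Pairwise (fun a b => b ≤ a) := by
    simpa using PySem.List.sorted_pairwise_rev (xs := A) (key := fun x => x)
  have hdesck : (sa.take k).Pairwise (fun a b => b ≤ a) := hdesc.sublist (List.take_sublist k sa)
  have hbounds := stepB_bounds sb (sa.take k) 0
  have hlen_take : (sa.take k).length = k := by
    rw [List.length_take]; omega
  have hmk : sb.length ≤ k := by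
    have := hbounds.2.1; rw [hfold, hlen_take] at this; omega
  apply hpre
  refine ⟨by omega, by omega, ?_⟩
  intro m hm
  have hmB : m < sb.length := by omega
  have := matched_tail sb (sa.take k) hdesck 0 m (Nat.zero_le _) (by rw [hfold]; exact hmB)
  rw [hfold, hlen_take] at this
  have hidx1 : k - (sb.length - m) < k := by omega
  rw [getD_take sa k _ hidx1] at this
  -- move from index k-(|sb|-m) to the larger index A.length-1-|sb|+m using descending order
  have hstep : sa.getD (A.length - 1 - B.length + m) 0 ≤ sa.getD (k - (sb.length - m)) 0 := by
    apply desc_getD sa hdesc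
    · omega
    · omega
  calc sa.getD (A.length - 1 - B.length + m) 0 ≤ sa.getD (k - (sb.length - m)) 0 := hstep
    _ < sb.getD m 0 := this

-- ===== VERDICT (by name: the statement is the Claim_ definition above) =====
theorem solution_spec : Claim_equal_solution := by
  intro A B _ hpre
  unfold Spec_solution solution solution_alt
  show (match (PySem.List.sorted A (fun x => x) true).foldl stepA
          (some ((0 : Int), PySem.List.sorted B (fun x => x) true)) with
        | some (ans, _) => ans
        | none => 0) =
      (((PySem.List.sorted A (fun x => x) true).foldl
          (stepB (PySem.List.sorted B (fun x => x) true)) 0 : Nat) : Int)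
  rcases bridge (PySem.List.sorted B (fun x => x) true) (PySem.List.sorted A (fun x => x) true) 0
      (Nat.zero_le _) with h | h
  · simp only [List.drop_zero, Nat.cast_zero] at h
    exact absurd h (no_raise A B hpre)
  · simp only [List.drop_zero, Nat.cast_zero] at h
    rw [h]
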